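-- pv_equiv track=rewrite | github.com/CompetitiveCodingLeetcode/LeetcodeEasy | Stack/DeleteMiddleElementInStack.py | find_mid_and_delete
-- ===== SOURCE A (Python) =====
-- def find_mid_and_delete(stack, size, count):
--     # base case
--     if count == size//2:
--         stack.pop()
--         return
--
--     num = stack[-1]
--     stack.pop()
--
--     #recursive call
--     find_mid_and_delete(stack,size,count+1)
--
--     stack.append(num)
--
--     return stack
-- ===== SOURCE B (Python) =====
-- def find_mid_and_delete(stack, size, count):
--     if count == size // 2:
--         stack.pop()
--         return
--     del stack[len(stack) - 1 - (size // 2 - count)]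
--     return stack
-- ===== Notes on version B (the rewrite author's own statement) =====
-- stated objective: simpler
-- what changed: Replaces the pop-recurse-push recursion with direct index arithmetic: the middle element sits at index len(stack)-1-(size//2-count), and a single del removes it with no recursion and no element shuffling.
import Mathlib
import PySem

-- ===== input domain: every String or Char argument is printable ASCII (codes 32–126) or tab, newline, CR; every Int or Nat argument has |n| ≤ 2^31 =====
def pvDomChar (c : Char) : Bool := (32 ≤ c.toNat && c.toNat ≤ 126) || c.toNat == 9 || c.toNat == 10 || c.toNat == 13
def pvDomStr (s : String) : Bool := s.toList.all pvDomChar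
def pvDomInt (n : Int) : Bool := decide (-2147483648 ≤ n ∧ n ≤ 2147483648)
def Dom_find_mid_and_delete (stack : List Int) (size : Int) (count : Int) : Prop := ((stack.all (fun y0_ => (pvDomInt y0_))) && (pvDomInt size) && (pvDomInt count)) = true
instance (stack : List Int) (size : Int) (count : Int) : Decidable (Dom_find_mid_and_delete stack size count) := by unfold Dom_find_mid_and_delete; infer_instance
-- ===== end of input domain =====

-- B removes the middle element by direct index arithmetic (one `del`) instead of A's recursion;
-- equivalence is about the RETURN value (both Pythons mutate `stack` in place; inside Pre_ the
-- final mutated list is the same).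

-- ===== PORT A =====
-- recursive helper: the list `stack` ends up holding after the call (Python mutates it in place).
-- stack[-1] on a nonempty list is its last element (exact); [] branch = the IndexError case, excluded by Pre_.
def find_mid_go (stack : List Int) (size : Int) (count : Int) : List Int :=
  if count = PySem.Int.floordiv size 2 then stack.dropLast
  else match stack with
    | [] => []  -- Python raises IndexError here (outside Pre_)
    | x :: xs =>
        let num := (x :: xs).getLast (by simp)
        find_mid_go (x :: xs).dropLast size (count + 1) ++ [num]
termination_by stack.length
decreasing_by simp

def find_mid_and_delete (stack : List Int) (size : Int) (count : Int) : Option (List Int) :=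
  if count = PySem.Int.floordiv size 2 then none      -- base case: pop, `return` (None)
  else some (find_mid_go stack size count)

-- ===== PORT B =====
-- `del stack[i]` = PySem.List.pop? (negative-wrap and IndexError exactly as Python; none = IndexError, outside Pre_)
def find_mid_and_delete_alt (stack : List Int) (size : Int) (count : Int) : Option (List Int) :=
  if count = PySem.Int.floordiv size 2 then none
  else
    match PySem.List.pop? stack ((stack.length : Int) - 1 - (PySem.Int.floordiv size 2 - count)) with
    | some (_, rest) => some rest
    | none => none  -- IndexError (outside Pre_)

-- ===== PRECONDITION & SPEC =====
-- exactly the inputs on which the Python A returns: it pops (size//2 - count) + 1 elements,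
-- so size//2 - count must be ≥ 0 and the stack must hold more than that many elements.
def Pre_find_mid_and_delete (stack : List Int) (size : Int) (count : Int) : Prop :=
  0 ≤ PySem.Int.floordiv size 2 - count ∧ PySem.Int.floordiv size 2 - count < stack.length
instance (stack : List Int) (size : Int) (count : Int) : Decidable (Pre_find_mid_and_delete stack size count) := by unfold Pre_find_mid_and_delete; infer_instance

def pvWitness_find_mid_and_delete : List Int × Int × Int := ([1, 2, 3], 3, 0)

def Spec_find_mid_and_delete (stack : List Int) (size : Int) (count : Int) (out : Option (List Int)) : Prop := out = find_mid_and_delete_alt stack size count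
instance (stack : List Int) (size : Int) (count : Int) (out : Option (List Int)) : Decidable (Spec_find_mid_and_delete stack size count out) := by unfold Spec_find_mid_and_delete; infer_instance

-- ===== CLAIM =====
def Claim_equal_find_mid_and_delete : Prop := ∀ (stack : List Int) (size : Int) (count : Int), Dom_find_mid_and_delete stack size count → Pre_find_mid_and_delete stack size count → Spec_find_mid_and_delete stack size count (find_mid_and_delete stack size count)

-- ===== LEMMAS AND PROOFS =====

-- A's recursion deletes exactly the element at index length - 1 - (size//2 - count).
theorem find_mid_go_eq (n : Nat) :
    ∀ (stack : List Int) (size count : Int),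
      count + n = PySem.Int.floordiv size 2 → n < stack.length →
      find_mid_go stack size count = stack.eraseIdx (stack.length - 1 - n) := by
  induction n with
  | zero =>
      intro stack size count hc _
      rw [find_mid_go.eq_def]
      simp [show count = PySem.Int.floordiv size 2 by omega]
  | succ m ih =>
      intro stack size count hc hl
      have hne : ¬ count = PySem.Int.floordiv size 2 := by omega
      rw [find_mid_go.eq_def]
      match stack with
      | [] => simp at hl
      | x :: xs =>
          simp only [hne, if_false]
          have hlen : (x :: xs).dropLast.length = xs.length := by simp
          rw [ih _ size (count + 1) (by omega) (by simp at hl ⊢; omega)]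
          have hsplit : x :: xs = (x :: xs).dropLast ++ [(x :: xs).getLast (by simp)] :=
            (List.dropLast_concat_getLast (by simp)).symm
          conv_rhs => rw [hsplit]
          rw [List.eraseIdx_append_of_lt_length (by simp at hl ⊢; omega)]
          congr 2
          simp
          omega

theorem find_mid_and_delete_spec : Claim_equal_find_mid_and_delete := by
  intro stack size count _ hpre
  unfold Spec_find_mid_and_delete find_mid_and_delete find_mid_and_delete_alt
  by_cases h : count = PySem.Int.floordiv size 2
  · simp [h]
  · obtain ⟨h0, h1⟩ := hpre
    set k : Nat := (PySem.Int.floordiv size 2 - count).toNat with hk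
    have hklen : k < stack.length := by omega
    have hcast : (stack.length : Int) - 1 - (PySem.Int.floordiv size 2 - count)
        = ((stack.length - 1 - k : Nat) : Int) := by omega
    simp only [h, if_false]
    have hp := PySem.List.pop?_natCast (xs := stack) (n := stack.length - 1 - k) (by omega)
    rw [hcast]
    rw [hp]
    rw [find_mid_go_eq k stack size count (by omega) hklen]
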